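-- pv_equiv track=rewrite | github.com/tindo2003/socket_prog | array/heap/kth_largest_ele__for_first_i_elements.py | getGreatestElements
-- ===== SOURCE A (Python) =====
-- import heapq
--
-- def getGreatestElements(arr, k):
--     # Write your code here
--     h = []
--     for i in range(k):
--         heapq.heappush(h, arr[i])
--         if len(h) > k:
--             heapq.heappop(h)
--     res = []
--     res.append(h[0])
--     for idx in range(k, len(arr)):
--         heapq.heappush(h, arr[idx])
--         if len(h) > k:
--             heapq.heappop(h)
--         res.append(h[0])
--     return res
-- ===== SOURCE B (Python) =====
-- from bisect import insort
--
-- def getGreatestElements(arr, k):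
--     # Keep the first k elements in a sorted window; the kth largest of a
--     # prefix of size m is the element at index m-k of the sorted prefix.
--     window = []
--     for i in range(k):
--         insort(window, arr[i])
--     res = [window[0]]
--     for idx in range(k, len(arr)):
--         insort(window, arr[idx])
--         res.append(window[len(window) - k])
--     return res
-- ===== Notes on version B (the rewrite author's own statement) =====
-- stated objective: alternative
-- what changed: Replaces the binary min-heap (heappush/heappop with sift-up/sift-down) by a sorted window maintained with bisect.insort, reading the kth largest of a size-m prefix directly as window[m-k] instead of the heap root after a push/pop cycle.
import Mathlib
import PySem

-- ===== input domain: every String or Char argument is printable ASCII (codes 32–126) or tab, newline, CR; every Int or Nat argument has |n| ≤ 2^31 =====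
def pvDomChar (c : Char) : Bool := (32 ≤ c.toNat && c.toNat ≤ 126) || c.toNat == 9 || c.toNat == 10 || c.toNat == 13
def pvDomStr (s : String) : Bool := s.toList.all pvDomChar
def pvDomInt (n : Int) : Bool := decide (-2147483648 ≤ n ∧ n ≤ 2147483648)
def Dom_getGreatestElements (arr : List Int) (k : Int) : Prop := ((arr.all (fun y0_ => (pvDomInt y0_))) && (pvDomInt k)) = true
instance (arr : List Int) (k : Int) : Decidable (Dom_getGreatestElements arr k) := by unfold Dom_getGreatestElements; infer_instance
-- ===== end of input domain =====

-- B replaces A's binary min-heap (heapq push/pop with sift-up/sift-down) by a sorted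
-- window maintained with bisect.insort, reading the kth largest of each prefix directly
-- at index (size - k); same return values, no speed claim.


-- ===== PORT A =====
def siftdownA (heap : List Int) (startpos pos : Nat) (newitem : Int) : List Int :=
  if _h : startpos < pos then
    let parentpos := (pos - 1) / 2
    let parent := heap.getD parentpos 0
    if newitem < parent then
      siftdownA (heap.set pos parent) startpos parentpos newitem
    else
      heap.set pos newitem
  else
    heap.set pos newitem
termination_by pos
decreasing_by omega

def siftupA (heap : List Int) (startpos pos : Nat) (newitem : Int) : List Int :=
  if h : 2 * pos + 1 < heap.length then
    let childpos :=
      if 2 * pos + 2 < heap.length ∧ ¬ heap.getD (2 * pos + 1) 0 < heap.getD (2 * pos + 2) 0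
      then 2 * pos + 2 else 2 * pos + 1
    siftupA (heap.set pos (heap.getD childpos 0)) startpos childpos newitem
  else
    siftdownA (heap.set pos newitem) startpos pos newitem
termination_by heap.length - pos
decreasing_by
  simp only [List.length_set]
  split <;> omega

def heappushA (heap : List Int) (item : Int) : List Int :=
  siftdownA (heap ++ [item]) 0 heap.length item

def heappopA (heap : List Int) : Int × List Int :=
  let lastelt := heap.getLast?.getD 0
  let rest := heap.dropLast
  if rest.isEmpty then (lastelt, rest)
  else (PySem.List.pyGetD rest 0 0, siftupA (rest.set 0 lastelt) 0 0 lastelt)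

def getGreatestElements (arr : List Int) (k : Int) : List Int :=
  let h := (PySem.List.pyRange 0 k 1).foldl
    (fun h i =>
      let h' := heappushA h (PySem.List.pyGetD arr i 0)
      if (h'.length : Int) > k then (heappopA h').2 else h') []
  let st := (PySem.List.pyRange k (arr.length : Int) 1).foldl
    (fun (st : List Int × List Int) idx =>
      let h' := heappushA st.1 (PySem.List.pyGetD arr idx 0)
      let h'' := if (h'.length : Int) > k then (heappopA h').2 else h'
      (h'', st.2 ++ [PySem.List.pyGetD h'' 0 0]))
    (h, [PySem.List.pyGetD h 0 0])
  st.2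

-- ===== PORT B =====
def insortB (w : List Int) (x : Int) : List Int :=
  let j := PySem.List.bisectRight w x
  w.take j ++ x :: w.drop j

def getGreatestElements_alt (arr : List Int) (k : Int) : List Int :=
  let w := (PySem.List.pyRange 0 k 1).foldl
    (fun w i => insortB w (PySem.List.pyGetD arr i 0)) []
  let st := (PySem.List.pyRange k (arr.length : Int) 1).foldl
    (fun (st : List Int × List Int) idx =>
      let w' := insortB st.1 (PySem.List.pyGetD arr idx 0)
      (w', st.2 ++ [PySem.List.pyGetD w' ((w'.length : Int) - k) 0]))
    (w, [PySem.List.pyGetD w 0 0])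
  st.2

-- ===== PRECONDITION & SPEC =====
-- Pre_ excludes exactly the inputs on which A raises IndexError: k < 1 (h[0] on the
-- empty heap) or k > len(arr) (arr[i] out of range).  B raises on the same inputs.
def Pre_getGreatestElements (arr : List Int) (k : Int) : Prop :=
  1 ≤ k ∧ k ≤ (arr.length : Int)
instance (arr : List Int) (k : Int) : Decidable (Pre_getGreatestElements arr k) := by
  unfold Pre_getGreatestElements; infer_instance

def pvWitness_getGreatestElements : List Int × Int := ([3, 1, 4, 2], 2)

def Spec_getGreatestElements (arr : List Int) (k : Int) (out : List Int) : Prop :=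
  out = getGreatestElements_alt arr k
instance (arr : List Int) (k : Int) (out : List Int) : Decidable (Spec_getGreatestElements arr k out) := by
  unfold Spec_getGreatestElements; infer_instance

-- ===== CLAIM (what is proved, stated in full; the proofs are below) =====
def Claim_equal_getGreatestElements : Prop :=
  ∀ (arr : List Int) (k : Int), Dom_getGreatestElements arr k →
    Pre_getGreatestElements arr k →
    Spec_getGreatestElements arr k (getGreatestElements arr k)

-- ===== LEMMAS AND PROOFS =====
lemma set_multiset (l : List Int) (i : Nat) (a : Int) (h : i < l.length) :
    (↑(l.set i a) : Multiset Int) + {l.getD i 0} = (↑l : Multiset Int) + {a} := by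
  have hget : l.getD i 0 = l[i] := by simp [List.getD_eq_getElem?_getD, List.getElem?_eq_getElem h]
  have hl : l = l.take i ++ l[i] :: l.drop (i+1) := by
    rw [List.getElem_cons_drop, List.take_append_drop]
  rw [List.set_eq_take_append_cons_drop]
  simp only [h, if_true, hget]
  conv_rhs => rw [hl]
  simp only [← Multiset.coe_add, ← Multiset.cons_coe, ← Multiset.singleton_add]
  abel

lemma getD_set_ne (l : List Int) (i j : Nat) (a : Int) (hne : i ≠ j) :
    (l.set i a).getD j 0 = l.getD j 0 := by
  simp [List.getD_eq_getElem?_getD, hne]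

lemma getD_set_self (l : List Int) (i : Nat) (a : Int) (h : i < l.length) :
    (l.set i a).getD i 0 = a := by
  simp [List.getD_eq_getElem?_getD, h]

lemma siftdownA_length (heap : List Int) (startpos pos : Nat) (newitem : Int) :
    (siftdownA heap startpos pos newitem).length = heap.length := by
  induction heap, pos using siftdownA.induct startpos newitem with
  | case1 heap pos h pp par hlt ih =>
      rw [siftdownA]
      simp only [dif_pos h, ← List.getD_eq_getElem?_getD]
      rw [if_pos (show newitem < heap.getD ((pos-1)/2) 0 from hlt)]
      simpa using ih
  | case2 heap pos h pp par hlt =>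
      rw [siftdownA]
      simp only [dif_pos h, ← List.getD_eq_getElem?_getD]
      rw [if_neg (show ¬ newitem < heap.getD ((pos-1)/2) 0 from hlt)]
      simp
  | case3 heap pos h =>
      rw [siftdownA]
      simp only [dif_neg h]
      simp

lemma siftdownA_multiset (heap : List Int) (startpos pos : Nat) (newitem : Int)
    (hpos : pos < heap.length) :
    (↑(siftdownA heap startpos pos newitem) : Multiset Int) + {heap.getD pos 0}
      = (↑heap : Multiset Int) + {newitem} := by
  induction heap, pos using siftdownA.induct startpos newitem with
  | case1 heap pos h pp par hlt ih =>
      rw [siftdownA]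
      simp only [dif_pos h, ← List.getD_eq_getElem?_getD]
      rw [if_pos (show newitem < heap.getD ((pos-1)/2) 0 from hlt)]
      have hppos : (pos - 1) / 2 < heap.length := by omega
      have hne : pos ≠ (pos - 1) / 2 := by omega
      have hrec := ih (by simpa using hppos)
      rw [getD_set_ne heap pos ((pos-1)/2) _ hne] at hrec
      have hsm := set_multiset heap pos (heap.getD ((pos-1)/2) 0) hpos
      have key : ((↑(siftdownA (heap.set pos (heap.getD ((pos-1)/2) 0)) startpos ((pos-1)/2) newitem) : Multiset Int)
            + {heap.getD pos 0}) + {heap.getD ((pos-1)/2) 0}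
          = ((↑heap : Multiset Int) + {newitem}) + {heap.getD ((pos-1)/2) 0} := by
        calc ((↑(siftdownA (heap.set pos (heap.getD ((pos-1)/2) 0)) startpos ((pos-1)/2) newitem) : Multiset Int)
                + {heap.getD pos 0}) + {heap.getD ((pos-1)/2) 0}
            = ((↑(siftdownA (heap.set pos (heap.getD ((pos-1)/2) 0)) startpos ((pos-1)/2) newitem) : Multiset Int)
                + {heap.getD ((pos-1)/2) 0}) + {heap.getD pos 0} := by abel
          _ = ((↑(heap.set pos (heap.getD ((pos-1)/2) 0)) : Multiset Int) + {newitem}) + {heap.getD pos 0} := by rw [hrec]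
          _ = ((↑(heap.set pos (heap.getD ((pos-1)/2) 0)) : Multiset Int) + {heap.getD pos 0}) + {newitem} := by abel
          _ = ((↑heap : Multiset Int) + {heap.getD ((pos-1)/2) 0}) + {newitem} := by rw [hsm]
          _ = ((↑heap : Multiset Int) + {newitem}) + {heap.getD ((pos-1)/2) 0} := by abel
      exact add_right_cancel key
  | case2 heap pos h pp par hlt =>
      rw [siftdownA]
      simp only [dif_pos h, ← List.getD_eq_getElem?_getD]
      rw [if_neg (show ¬ newitem < heap.getD ((pos-1)/2) 0 from hlt)]
      exact set_multiset heap pos newitem hpos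
  | case3 heap pos h =>
      rw [siftdownA]
      simp only [dif_neg h]
      exact set_multiset heap pos newitem hpos

def pvParent (j : Nat) : Nat := (j - 1) / 2

def IsHeap (l : List Int) : Prop :=
  ∀ j, 0 < j → j < l.length → l.getD (pvParent j) 0 ≤ l.getD j 0

lemma siftdownA_heap (heap : List Int) (pos : Nat) (newitem : Int)
    (hpos : pos < heap.length)
    (H1 : ∀ j, 0 < j → j < heap.length → j ≠ pos → heap.getD (pvParent j) 0 ≤ heap.getD j 0)
    (H2 : ∀ j, 0 < j → j < heap.length → pvParent j = pos → newitem ≤ heap.getD j 0)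
    (H3 : ∀ j, 0 < j → j < heap.length → pvParent j = pos → 0 < pos →
            heap.getD (pvParent pos) 0 ≤ heap.getD j 0) :
    IsHeap (siftdownA heap 0 pos newitem) := by
  induction heap, pos using siftdownA.induct 0 newitem with
  | case1 heap pos h pp par hlt ih =>
      rw [siftdownA]
      simp only [dif_pos h, ← List.getD_eq_getElem?_getD]
      rw [if_pos (show newitem < heap.getD ((pos-1)/2) 0 from hlt)]
      have hP : pvParent pos = (pos - 1) / 2 := rfl
      have hppos : (pos - 1) / 2 < heap.length := by omega
      set p := (pos - 1) / 2 with hpdef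
      set l' := heap.set pos (heap.getD p 0) with hl'
      have hlen : l'.length = heap.length := by simp [hl']
      have hppne : p ≠ pos := by omega
      have gne : ∀ i, i ≠ pos → l'.getD i 0 = heap.getD i 0 := by
        intro i hi; rw [hl']; exact getD_set_ne _ _ _ _ (fun e => hi e.symm)
      have gself : l'.getD pos 0 = heap.getD p 0 := by
        rw [hl']; exact getD_set_self _ _ _ hpos
      apply ih
      · omega
      · -- H1'
        intro j hj0 hjl hjp
        rw [hlen] at hjl
        by_cases hjpos : j = pos
        · subst hjpos
          have h1 : pvParent j = p := hP
          rw [h1, gself, gne p hppne]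
        · by_cases hpar : pvParent j = pos
          · rw [hpar, gself, gne j hjpos]
            exact H3 j hj0 hjl hpar (by omega)
          · rw [gne j hjpos, gne _ hpar]
            exact H1 j hj0 hjl hjpos
      · -- H2'
        intro j hj0 hjl hparj
        rw [hlen] at hjl
        by_cases hjpos : j = pos
        · subst hjpos; rw [gself]; exact le_of_lt hlt
        · rw [gne j hjpos]
          have : heap.getD (pvParent j) 0 ≤ heap.getD j 0 := H1 j hj0 hjl hjpos
          rw [hparj] at this
          calc newitem ≤ heap.getD p 0 := le_of_lt hlt
            _ ≤ heap.getD j 0 := this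
      · -- H3'
        intro j hj0 hjl hparj hp0
        rw [hlen] at hjl
        have hpl : p < heap.length := by omega
        have hpne : p ≠ pos := by omega
        have hgp : l'.getD (pvParent p) 0 = heap.getD (pvParent p) 0 := by
          apply gne; have : pvParent p < p := by simp [pvParent]; omega
          omega
        have hbase : heap.getD (pvParent p) 0 ≤ heap.getD p 0 :=
          H1 p hp0 hpl hpne
        rw [hgp]
        by_cases hjpos : j = pos
        · subst hjpos; rw [gself]; exact hbase
        · rw [gne j hjpos]
          have h2 : heap.getD (pvParent j) 0 ≤ heap.getD j 0 := H1 j hj0 hjl hjpos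
          rw [hparj] at h2
          exact le_trans hbase h2
  | case2 heap pos h pp par hlt =>
      rw [siftdownA]
      simp only [dif_pos h, ← List.getD_eq_getElem?_getD]
      rw [if_neg (show ¬ newitem < heap.getD ((pos-1)/2) 0 from hlt)]
      intro j hj0 hjl
      simp only [List.length_set] at hjl
      have hP : pvParent pos = (pos - 1) / 2 := rfl
      by_cases hjpos : j = pos
      · subst hjpos
        have hne : pvParent j ≠ j := by simp [pvParent]; omega
        rw [getD_set_ne _ _ _ _ (fun e => hne e.symm), getD_set_self _ _ _ hpos, hP]
        exact le_of_not_gt hlt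
      · by_cases hpar : pvParent j = pos
        · rw [hpar, getD_set_self _ _ _ hpos, getD_set_ne _ _ _ _ (fun e => hjpos e.symm)]
          exact H2 j hj0 hjl hpar
        · rw [getD_set_ne _ _ _ _ (fun e => hjpos e.symm), getD_set_ne _ _ _ _ (fun e => hpar e.symm)]
          exact H1 j hj0 hjl hjpos
  | case3 heap pos h =>
      have hpos0 : pos = 0 := by omega
      subst hpos0
      rw [siftdownA]
      simp only [dif_neg h]
      intro j hj0 hjl
      simp only [List.length_set] at hjl
      by_cases hpar : pvParent j = 0
      · rw [hpar, getD_set_self _ _ _ hpos, getD_set_ne _ _ _ _ (fun e => (by omega : j ≠ 0) e.symm)]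
        exact H2 j hj0 hjl hpar
      · rw [getD_set_ne _ _ _ _ (fun e => (by omega : j ≠ 0) e.symm), getD_set_ne _ _ _ _ (fun e => hpar e.symm)]
        exact H1 j hj0 hjl (by omega)

lemma chooseChild (heap : List Int) (pos : Nat) (h : 2*pos+1 < heap.length)
    (c : Nat)
    (hc : c = if 2 * pos + 2 < heap.length ∧ ¬ heap.getD (2 * pos + 1) 0 < heap.getD (2 * pos + 2) 0
              then 2 * pos + 2 else 2 * pos + 1) :
    c < heap.length ∧ pvParent c = pos ∧ pos < c ∧
    (∀ j, 0 < j → j < heap.length → pvParent j = pos → heap.getD c 0 ≤ heap.getD j 0) := by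
  have hch : ∀ j, (0 < j ∧ pvParent j = pos) ↔ (j = 2*pos+1 ∨ j = 2*pos+2) := by
    intro j; simp only [pvParent]; omega
  split at hc
  · next hcond =>
      subst hc
      refine ⟨hcond.1, by simp only [pvParent]; omega, by omega, ?_⟩
      intro j hj0 hjl hpj
      rcases (hch j).mp ⟨hj0, hpj⟩ with rfl | rfl
      · exact le_of_not_gt hcond.2
      · exact le_refl _
  · next hcond =>
      subst hc
      refine ⟨h, by simp only [pvParent]; omega, by omega, ?_⟩
      intro j hj0 hjl hpj
      rcases (hch j).mp ⟨hj0, hpj⟩ with rfl | rfl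
      · exact le_refl _
      · rcases not_and_or.mp hcond with hb | hb
        · omega
        · exact le_of_lt (not_not.mp hb)

lemma siftupA_length (heap : List Int) (startpos pos : Nat) (newitem : Int) :
    (siftupA heap startpos pos newitem).length = heap.length := by
  induction heap, pos using siftupA.induct with
  | case1 heap pos h c ih =>
      rw [siftupA, dif_pos h]
      show (siftupA (heap.set pos (heap.getD c 0)) startpos c newitem).length = heap.length
      simpa using ih
  | case2 heap pos h =>
      rw [siftupA]
      simp only [dif_neg h]
      simp [siftdownA_length]

lemma siftupA_multiset (heap : List Int) (startpos pos : Nat) (newitem : Int)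
    (hpos : pos < heap.length) :
    (↑(siftupA heap startpos pos newitem) : Multiset Int) + {heap.getD pos 0}
      = (↑heap : Multiset Int) + {newitem} := by
  induction heap, pos using siftupA.induct with
  | case1 heap pos h c ih =>
      rw [siftupA, dif_pos h]
      show (↑(siftupA (heap.set pos (heap.getD c 0)) startpos c newitem) : Multiset Int) + {heap.getD pos 0} = (↑heap : Multiset Int) + {newitem}
      obtain ⟨hcl, hcp, hposc, hmin⟩ := chooseChild heap pos h c rfl
      have hcne : pos ≠ c := by omega
      have hrec := ih (by simpa using hcl)
      rw [getD_set_ne heap pos c _ hcne] at hrec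
      have hsm := set_multiset heap pos (heap.getD c 0) hpos
      have key : ((↑(siftupA (heap.set pos (heap.getD c 0)) startpos c newitem) : Multiset Int)
            + {heap.getD pos 0}) + {heap.getD c 0}
          = ((↑heap : Multiset Int) + {newitem}) + {heap.getD c 0} := by
        calc ((↑(siftupA (heap.set pos (heap.getD c 0)) startpos c newitem) : Multiset Int)
                + {heap.getD pos 0}) + {heap.getD c 0}
            = ((↑(siftupA (heap.set pos (heap.getD c 0)) startpos c newitem) : Multiset Int)
                + {heap.getD c 0}) + {heap.getD pos 0} := by abel
          _ = ((↑(heap.set pos (heap.getD c 0)) : Multiset Int) + {newitem}) + {heap.getD pos 0} := by rw [hrec]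
          _ = ((↑(heap.set pos (heap.getD c 0)) : Multiset Int) + {heap.getD pos 0}) + {newitem} := by abel
          _ = ((↑heap : Multiset Int) + {heap.getD c 0}) + {newitem} := by rw [hsm]
          _ = ((↑heap : Multiset Int) + {newitem}) + {heap.getD c 0} := by abel
      exact add_right_cancel key
  | case2 heap pos h =>
      rw [siftupA]
      simp only [dif_neg h]
      have h1 := siftdownA_multiset (heap.set pos newitem) startpos pos newitem (by simpa using hpos)
      rw [getD_set_self _ _ _ hpos] at h1
      have h2 : (↑(siftdownA (heap.set pos newitem) startpos pos newitem) : Multiset Int)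
          = (↑(heap.set pos newitem) : Multiset Int) := add_right_cancel h1
      rw [h2]
      exact set_multiset heap pos newitem hpos

lemma siftupA_heap (heap : List Int) (pos : Nat) (newitem : Int)
    (hpos : pos < heap.length)
    (I1 : ∀ j, 0 < j → j < heap.length → j ≠ pos → pvParent j ≠ pos →
            heap.getD (pvParent j) 0 ≤ heap.getD j 0)
    (I2 : ∀ j, 0 < j → j < heap.length → pvParent j = pos → 0 < pos →
            heap.getD (pvParent pos) 0 ≤ heap.getD j 0) :
    IsHeap (siftupA heap 0 pos newitem) := by
  induction heap, pos using siftupA.induct with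
  | case1 heap pos h c ih =>
      rw [siftupA, dif_pos h]
      show IsHeap (siftupA (heap.set pos (heap.getD c 0)) 0 c newitem)
      obtain ⟨hcl, hcp, hposc, hmin⟩ := chooseChild heap pos h c rfl
      have hcne : c ≠ pos := by omega
      set l' := heap.set pos (heap.getD c 0) with hl'
      have hlen : l'.length = heap.length := by simp [hl']
      have gne : ∀ i, i ≠ pos → l'.getD i 0 = heap.getD i 0 := by
        intro i hi; rw [hl']; exact getD_set_ne _ _ _ _ (fun e => hi e.symm)
      have gself : l'.getD pos 0 = heap.getD c 0 := by
        rw [hl']; exact getD_set_self _ _ _ hpos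
      apply ih
      · omega
      · -- I1'
        intro j hj0 hjl hjc hpjc
        rw [hlen] at hjl
        by_cases hjpos : j = pos
        · subst hjpos
          have hppj : pvParent j ≠ j := by simp only [pvParent]; omega
          rw [gne _ hppj, gself]
          exact I2 c (by omega) hcl hcp hj0
        · by_cases hpj : pvParent j = pos
          · rw [gne j hjpos]
            rw [hpj, gself]
            exact hmin j hj0 hjl hpj
          · rw [gne j hjpos, gne _ hpj]
            exact I1 j hj0 hjl hjpos hpj
      · -- I2'
        intro j hj0 hjl hpjc hc0
        rw [hlen] at hjl
        have hjpos : j ≠ pos := by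
          intro e; subst e
          have : pvParent j < j := by simp only [pvParent]; omega
          omega
        rw [hcp, gself, gne j hjpos]
        have : pvParent j ≠ pos := by omega
        have := I1 j hj0 hjl hjpos this
        rw [hpjc] at this
        exact this
  | case2 heap pos h =>
      rw [siftupA]
      simp only [dif_neg h]
      apply siftdownA_heap (heap.set pos newitem) pos newitem (by simpa using hpos)
      · intro j hj0 hjl hjpos
        simp only [List.length_set] at hjl
        by_cases hpj : pvParent j = pos
        · exfalso
          have : j = 2*pos+1 ∨ j = 2*pos+2 := by simp only [pvParent] at hpj; omega
          omega
        · rw [getD_set_ne _ _ _ _ (fun e => hjpos e.symm), getD_set_ne _ _ _ _ (fun e => hpj e.symm)]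
          exact I1 j hj0 hjl hjpos hpj
      · intro j hj0 hjl hpj
        exfalso
        simp only [List.length_set] at hjl
        have : j = 2*pos+1 ∨ j = 2*pos+2 := by simp only [pvParent] at hpj; omega
        omega
      · intro j hj0 hjl hpj _
        exfalso
        simp only [List.length_set] at hjl
        have : j = 2*pos+1 ∨ j = 2*pos+2 := by simp only [pvParent] at hpj; omega
        omega

lemma heappushA_length (h : List Int) (x : Int) :
    (heappushA h x).length = h.length + 1 := by
  rw [heappushA, siftdownA_length]; simp

lemma heappushA_multiset (h : List Int) (x : Int) :
    (↑(heappushA h x) : Multiset Int) = (↑h : Multiset Int) + {x} := by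
  rw [heappushA]
  have hlen : h.length < (h ++ [x]).length := by simp
  have hm := siftdownA_multiset (h ++ [x]) 0 h.length x hlen
  have hg : (h ++ [x]).getD h.length 0 = x := by
    simp [List.getD_eq_getElem?_getD]
  rw [hg] at hm
  have := add_right_cancel hm
  rw [this]
  simp [← Multiset.coe_add]

lemma heappushA_heap (h : List Int) (x : Int) (hh : IsHeap h) : IsHeap (heappushA h x) := by
  rw [heappushA]
  apply siftdownA_heap _ _ _ (by simp)
  · intro j hj0 hjl hjne
    simp only [List.length_append, List.length_singleton] at hjl
    have hjh : j < h.length := by omega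
    have hpj : pvParent j < h.length := by simp only [pvParent]; omega
    rw [List.getD_eq_getElem?_getD, List.getD_eq_getElem?_getD,
        List.getElem?_append_left hjh, List.getElem?_append_left hpj]
    exact hh j hj0 hjh
  · intro j hj0 hjl hpj
    exfalso
    simp only [List.length_append, List.length_singleton] at hjl
    simp only [pvParent] at hpj
    omega
  · intro j hj0 hjl hpj _
    exfalso
    simp only [List.length_append, List.length_singleton] at hjl
    simp only [pvParent] at hpj
    omega

lemma dropLast_getD_zero (h : List Int) (hne : ¬ h.dropLast.isEmpty) :
    h.dropLast.getD 0 0 = h.getD 0 0 := by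
  have hlz : h.dropLast ≠ [] := by simpa [List.isEmpty_iff] using hne
  have hlz2 : h.dropLast.length ≠ 0 := fun e => hlz (List.length_eq_zero_iff.mp e)
  have h2 : 1 < h.length := by
    have hl := h.length_dropLast
    omega
  rw [List.getD_eq_getElem?_getD, List.getD_eq_getElem?_getD, List.getElem?_dropLast]
  simp [h2]

lemma heappopA_length (h : List Int) :
    (heappopA h).2.length = h.length - 1 := by
  rw [heappopA]
  by_cases he : h.dropLast.isEmpty
  · simp [he]
  · simp only [he, if_false]
    show (siftupA (h.dropLast.set 0 (h.getLast?.getD 0)) 0 0 (h.getLast?.getD 0)).length = h.length - 1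
    rw [siftupA_length]
    simp

lemma heappopA_multiset (h : List Int) (hne : h ≠ []) :
    (↑(heappopA h).2 : Multiset Int) + {h.getD 0 0} = (↑h : Multiset Int) := by
  rw [heappopA]
  by_cases he : h.dropLast.isEmpty
  · simp only [he, if_true]
    have hd : h.dropLast = [] := by simpa [List.isEmpty_iff] using he
    have h1 : h.length = 1 := by
      have := h.length_dropLast
      have hlz : h.length ≠ 0 := fun e => hne (List.length_eq_zero_iff.mp e)
      rw [hd] at this; simp at this; omega
    obtain ⟨a, ha⟩ : ∃ a, h = [a] := by
      cases h with
      | nil => simp at h1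
      | cons a t =>
          cases t with
          | nil => exact ⟨a, rfl⟩
          | cons b u => simp at h1
    subst ha
    simp [hd]
  · simp only [he, if_false]
    have hrne : h.dropLast ≠ [] := by simpa [List.isEmpty_iff] using he
    have hrl : 0 < h.dropLast.length := List.length_pos_iff.mpr hrne
    show (↑(siftupA (h.dropLast.set 0 (h.getLast?.getD 0)) 0 0 (h.getLast?.getD 0)) : Multiset Int) + {h.getD 0 0} = (↑h : Multiset Int)
    have hsu := siftupA_multiset (h.dropLast.set 0 (h.getLast?.getD 0)) 0 0 (h.getLast?.getD 0) (by simpa using hrl)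
    rw [getD_set_self _ _ _ hrl] at hsu
    have hres := add_right_cancel hsu
    rw [hres]
    have hsm := set_multiset h.dropLast 0 (h.getLast?.getD 0) hrl
    rw [dropLast_getD_zero h he] at hsm
    rw [hsm]
    have hlast : h.getLast?.getD 0 = h.getLast hne := by
      rw [List.getLast?_eq_some_getLast hne]; rfl
    rw [hlast]
    have : h.dropLast ++ [h.getLast hne] = h := List.dropLast_append_getLast hne
    calc (↑h.dropLast : Multiset Int) + {h.getLast hne}
        = (↑(h.dropLast ++ [h.getLast hne]) : Multiset Int) := by simp [← Multiset.coe_add]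
      _ = (↑h : Multiset Int) := by rw [this]

lemma heappopA_heap (h : List Int) (hh : IsHeap h) : IsHeap (heappopA h).2 := by
  rw [heappopA]
  by_cases he : h.dropLast.isEmpty
  · simp only [he, if_true]
    intro j hj0 hjl
    have hd : h.dropLast = [] := by simpa [List.isEmpty_iff] using he
    rw [hd] at hjl; simp at hjl
  · simp only [he, if_false]
    have hrne : h.dropLast ≠ [] := by simpa [List.isEmpty_iff] using he
    have hrl : 0 < h.dropLast.length := List.length_pos_iff.mpr hrne
    show IsHeap (siftupA (h.dropLast.set 0 (h.getLast?.getD 0)) 0 0 (h.getLast?.getD 0))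
    apply siftupA_heap _ _ _ (by simpa using hrl)
    · intro j hj0 hjl hjne hpne
      simp only [List.length_set] at hjl
      have hpj : pvParent j < j := by simp only [pvParent]; omega
      rw [getD_set_ne _ _ _ _ (fun e => hjne e.symm), getD_set_ne _ _ _ _ (fun e => hpne e.symm)]
      have hdl : ∀ i, i < h.dropLast.length → h.dropLast.getD i 0 = h.getD i 0 := by
        intro i hi
        rw [List.getD_eq_getElem?_getD, List.getD_eq_getElem?_getD, List.getElem?_dropLast]
        simp only [List.length_dropLast] at hi
        have : i < h.length - 1 := hi
        simp [this]
      rw [hdl j hjl, hdl (pvParent j) (by omega)]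
      exact hh j hj0 (by have := h.length_dropLast; omega)
    · intro j hj0 hjl hpj hp0
      exact absurd hp0 (by omega)

lemma isHeap_root_min (l : List Int) (hl : IsHeap l) :
    ∀ j, j < l.length → l.getD 0 0 ≤ l.getD j 0 := by
  intro j
  induction j using Nat.strong_induction_on with
  | _ j ih =>
      intro hjl
      rcases Nat.eq_zero_or_pos j with rfl | hj0
      · exact le_refl _
      · have hpj : pvParent j < j := by simp only [pvParent]; omega
        exact le_trans (ih (pvParent j) hpj (by omega)) (hl j hj0 hjl)

lemma head_eq_of_multiset (g s : List Int) (hg : IsHeap g) (hs : s.Pairwise (· ≤ ·))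
    (hne : g ≠ []) (hm : (↑g : Multiset Int) = (↑s : Multiset Int)) :
    g.getD 0 0 = s.getD 0 0 := by
  have hperm : g.Perm s := Multiset.coe_eq_coe.mp hm
  have hsne : s ≠ [] := fun e => hne (List.Perm.eq_nil (e ▸ hperm))
  have hgl : 0 < g.length := List.length_pos_iff.mpr hne
  have hsl : 0 < s.length := List.length_pos_iff.mpr hsne
  have hg0 : g.getD 0 0 = g[0] := by simp [List.getD_eq_getElem?_getD, List.getElem?_eq_getElem hgl]
  have hs0 : s.getD 0 0 = s[0] := by simp [List.getD_eq_getElem?_getD, List.getElem?_eq_getElem hsl]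
  rw [hg0, hs0]
  have hsmin : ∀ y ∈ s, s[0] ≤ y := by
    cases s with
    | nil => simp at hsl
    | cons a t =>
        intro y hy
        rcases List.mem_cons.mp hy with rfl | hyt
        · exact le_refl _
        · exact (List.pairwise_cons.mp hs).1 y hyt
  have hgmin : ∀ y ∈ g, g[0] ≤ y := by
    intro y hy
    obtain ⟨i, hi, rfl⟩ := List.mem_iff_getElem.mp hy
    have := isHeap_root_min g hg i hi
    rw [hg0] at this
    rwa [show g.getD i 0 = g[i] by simp [List.getD_eq_getElem?_getD, List.getElem?_eq_getElem hi]] at this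
  have h1 : s[0] ≤ g[0] := hsmin _ (hperm.mem_iff.mp (List.getElem_mem hgl))
  have h2 : g[0] ≤ s[0] := hgmin _ (hperm.mem_iff.mpr (List.getElem_mem hsl))
  exact le_antisymm h2 h1

lemma insortB_multiset (w : List Int) (x : Int) :
    (↑(insortB w x) : Multiset Int) = (↑w : Multiset Int) + {x} := by
  rw [insortB]
  conv_rhs => rw [← List.take_append_drop (PySem.List.bisectRight w x) w]
  simp only [← Multiset.coe_add, ← Multiset.cons_coe, ← Multiset.singleton_add]
  abel

lemma insortB_length (w : List Int) (x : Int) :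
    (insortB w x).length = w.length + 1 := by
  rw [insortB]
  simp only [List.length_append, List.length_cons, List.length_take, List.length_drop]
  omega

lemma insortB_sorted (w : List Int) (x : Int) (hw : w.Pairwise (· ≤ ·)) :
    (insortB w x).Pairwise (· ≤ ·) := by
  obtain ⟨hjle, hlo, hhi⟩ := PySem.List.bisectRight_spec w x hw
  rw [insortB]
  rw [List.pairwise_append]
  refine ⟨hw.sublist (List.take_sublist _ _), ?_, ?_⟩
  · rw [List.pairwise_cons]
    refine ⟨?_, hw.sublist (List.drop_sublist _ _)⟩
    intro y hy
    obtain ⟨t, ht, rfl⟩ := List.mem_iff_getElem.mp hy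
    rw [List.getElem_drop]
    exact le_of_lt (hhi _ (by simp only [List.length_drop] at ht; omega) (by omega))
  · intro a ha b hb
    obtain ⟨t, ht, rfl⟩ := List.mem_iff_getElem.mp ha
    rw [List.getElem_take]
    have htj : t < PySem.List.bisectRight w x := by simp only [List.length_take] at ht; omega
    have htl : t < w.length := by simp only [List.length_take] at ht; omega
    have hax : w[t] ≤ x := hlo t htl htj
    rcases List.mem_cons.mp hb with rfl | hbd
    · exact hax
    · obtain ⟨u, hu, rfl⟩ := List.mem_iff_getElem.mp hbd
      rw [List.getElem_drop]
      exact le_trans hax (le_of_lt (hhi _ (by simp only [List.length_drop] at hu; omega) (by omega)))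

lemma getD_drop (l : List Int) (i : Nat) : (l.drop i).getD 0 0 = l.getD i 0 := by
  simp [List.getD_eq_getElem?_getD]

lemma insortB_drop_of_le (w : List Int) (x : Int) (i : Nat) (hw : w.Pairwise (· ≤ ·))
    (hi : i ≤ PySem.List.bisectRight w x) :
    (↑((insortB w x).drop i) : Multiset Int) = (↑(w.drop i) : Multiset Int) + {x} := by
  obtain ⟨hjle, _, _⟩ := PySem.List.bisectRight_spec w x hw
  set j := PySem.List.bisectRight w x with hj
  have hlt : (w.take j).length = j := List.length_take_of_le hjle
  rw [insortB, ← hj, List.drop_append]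
  rw [hlt, show i - j = 0 by omega, List.drop_zero]
  conv_rhs => rw [← List.take_append_drop j w, List.drop_append, hlt, show i - j = 0 by omega, List.drop_zero]
  simp only [← Multiset.coe_add, ← Multiset.cons_coe, ← Multiset.singleton_add]
  abel

lemma insortB_drop_of_gt (w : List Int) (x : Int) (i : Nat) (hw : w.Pairwise (· ≤ ·))
    (hi : PySem.List.bisectRight w x < i) :
    (insortB w x).drop (i + 1) = w.drop i := by
  obtain ⟨hjle, _, _⟩ := PySem.List.bisectRight_spec w x hw
  set j := PySem.List.bisectRight w x with hj
  have hlt : (w.take j).length = j := List.length_take_of_le hjle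
  rw [insortB, ← hj, List.drop_append, hlt]
  have h1 : (w.take j).drop (i+1) = [] := by
    apply List.drop_eq_nil_of_le; omega
  rw [h1, List.nil_append, show i + 1 - j = (i - j - 1) + 1 + 1 by omega]
  show (x :: w.drop j).tail.drop (i - j - 1 + 1) = w.drop i
  rw [List.tail_cons, List.drop_drop]
  congr 1
  omega

lemma lt_of_mem_drop_of_ge (w : List Int) (x : Int) (i : Nat) (hw : w.Pairwise (· ≤ ·))
    (hi : PySem.List.bisectRight w x ≤ i) :
    ∀ y ∈ w.drop i, x < y := by
  obtain ⟨_, _, hhi⟩ := PySem.List.bisectRight_spec w x hw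
  intro y hy
  obtain ⟨t, ht, rfl⟩ := List.mem_iff_getElem.mp hy
  rw [List.getElem_drop]
  exact hhi _ (by simp only [List.length_drop] at ht; omega) (by omega)

lemma getD_mem (l : List Int) (hl : l ≠ []) : l.getD 0 0 ∈ l := by
  have h0 : 0 < l.length := List.length_pos_iff.mpr hl
  rw [show l.getD 0 0 = l[0] by simp [List.getD_eq_getElem?_getD, List.getElem?_eq_getElem h0]]
  exact List.getElem_mem h0

lemma root_min_mem (l : List Int) (hl : IsHeap l) : ∀ y ∈ l, l.getD 0 0 ≤ y := by
  intro y hy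
  obtain ⟨i, hi, rfl⟩ := List.mem_iff_getElem.mp hy
  have := isHeap_root_min l hl i hi
  rwa [show l.getD i 0 = l[i] by simp [List.getD_eq_getElem?_getD, List.getElem?_eq_getElem hi]] at this

lemma step_lemma (kn : Nat) (hk : 1 ≤ kn) (h w : List Int) (x : Int)
    (hh : IsHeap h) (hw : w.Pairwise (· ≤ ·)) (hlen : h.length = kn) (hwk : kn ≤ w.length)
    (hm : (↑h : Multiset Int) = (↑(w.drop (w.length - kn)) : Multiset Int)) :
    IsHeap (heappopA (heappushA h x)).2 ∧
    (heappopA (heappushA h x)).2.length = kn ∧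
    (↑(heappopA (heappushA h x)).2 : Multiset Int)
      = (↑((insortB w x).drop ((insortB w x).length - kn)) : Multiset Int) ∧
    (heappopA (heappushA h x)).2.getD 0 0 = (insortB w x).getD ((insortB w x).length - kn) 0 := by
  set i := w.length - kn with hi
  set h₁ := heappushA h x with hh₁
  have hh₁heap : IsHeap h₁ := heappushA_heap h x hh
  have hh₁len : h₁.length = kn + 1 := by rw [hh₁, heappushA_length, hlen]
  have hh₁ne : h₁ ≠ [] := by
    intro e; rw [e] at hh₁len; simp at hh₁len
  have hh₁m : (↑h₁ : Multiset Int) = (↑(w.drop i) : Multiset Int) + {x} := by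
    rw [hh₁, heappushA_multiset, hm]
  set h₂ := (heappopA h₁).2 with hh₂
  have hh₂heap : IsHeap h₂ := heappopA_heap h₁ hh₁heap
  have hh₂len : h₂.length = kn := by rw [hh₂, heappopA_length, hh₁len]; omega
  have hh₂ne : h₂ ≠ [] := by
    intro e; rw [e] at hh₂len; simp at hh₂len; omega
  have hh₂m : (↑h₂ : Multiset Int) + {h₁.getD 0 0} = (↑h₁ : Multiset Int) :=
    heappopA_multiset h₁ hh₁ne
  set w' := insortB w x with hw'
  have hw'sorted : w'.Pairwise (· ≤ ·) := insortB_sorted w x hw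
  have hw'len : w'.length = w.length + 1 := insortB_length w x
  have hip : w'.length - kn = i + 1 := by omega
  rw [hip]
  have hi1 : i + 1 < w'.length := by omega
  have hgetD : w'.getD (i+1) 0 = (w'.drop (i+1)).getD 0 0 := (getD_drop w' (i+1)).symm
  refine ⟨hh₂heap, hh₂len, ?_⟩
  by_cases hcase : i ≤ PySem.List.bisectRight w x
  · -- x lands at or after the window boundary
    have hC1 : (↑(w'.drop i) : Multiset Int) = (↑(w.drop i) : Multiset Int) + {x} :=
      insortB_drop_of_le w x i hw hcase
    have hm1 : (↑h₁ : Multiset Int) = (↑(w'.drop i) : Multiset Int) := by rw [hh₁m, hC1]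
    have hhead : h₁.getD 0 0 = (w'.drop i).getD 0 0 :=
      head_eq_of_multiset h₁ (w'.drop i) hh₁heap (hw'sorted.drop) hh₁ne hm1
    have hii : i < w'.length := by omega
    have hcons : w'.drop i = w'[i] :: w'.drop (i+1) := (List.getElem_cons_drop hii).symm
    have hgi : (w'.drop i).getD 0 0 = w'[i] := by
      rw [hcons]; simp [List.getD_eq_getElem?_getD, List.getElem?_eq_getElem hii]
    have hsplit : (↑(w'.drop i) : Multiset Int) = (↑(w'.drop (i+1)) : Multiset Int) + {w'[i]} := by
      rw [hcons]; simp only [← Multiset.cons_coe, ← Multiset.singleton_add]; abel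
    have hkey : (↑h₂ : Multiset Int) + {w'[i]} = (↑(w'.drop (i+1)) : Multiset Int) + {w'[i]} := by
      calc (↑h₂ : Multiset Int) + {w'[i]}
          = (↑h₂ : Multiset Int) + {h₁.getD 0 0} := by rw [hhead, hgi]
        _ = (↑h₁ : Multiset Int) := hh₂m
        _ = (↑(w'.drop (i+1)) : Multiset Int) + {w'[i]} := by rw [hm1, hsplit]
    have hm2 : (↑h₂ : Multiset Int) = (↑(w'.drop (i+1)) : Multiset Int) := add_right_cancel hkey
    refine ⟨hm2, ?_⟩
    rw [hgetD]
    exact head_eq_of_multiset h₂ (w'.drop (i+1)) hh₂heap (hw'sorted.drop) hh₂ne hm2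
  · -- x is strictly below the window: it is pushed and immediately popped
    replace hcase := Nat.lt_of_not_le hcase
    have hC2 : w'.drop (i+1) = w.drop i := insortB_drop_of_gt w x i hw hcase
    have hxmin : ∀ y ∈ w.drop i, x < y := lt_of_mem_drop_of_ge w x i hw (by omega)
    have hr : h₁.getD 0 0 = x := by
      have hmem : h₁.getD 0 0 ∈ h₁ := getD_mem h₁ hh₁ne
      have hmem' : h₁.getD 0 0 ∈ (↑h₁ : Multiset Int) := by simpa using hmem
      rw [hh₁m] at hmem'
      rcases Multiset.mem_add.mp hmem' with hm' | hm'
      · exfalso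
        have hxh : x ∈ h₁ := by
          have : x ∈ (↑h₁ : Multiset Int) := by rw [hh₁m]; simp
          simpa using this
        have h1 := root_min_mem h₁ hh₁heap x hxh
        have h2 := hxmin (h₁.getD 0 0) (by simpa using hm')
        omega
      · simpa using hm'
    have hm2 : (↑h₂ : Multiset Int) = (↑(w.drop i) : Multiset Int) := by
      have : (↑h₂ : Multiset Int) + {x} = (↑(w.drop i) : Multiset Int) + {x} := by
        calc (↑h₂ : Multiset Int) + {x} = (↑h₂ : Multiset Int) + {h₁.getD 0 0} := by rw [hr]
          _ = (↑h₁ : Multiset Int) := hh₂m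
          _ = (↑(w.drop i) : Multiset Int) + {x} := hh₁m
      exact add_right_cancel this
    refine ⟨by rw [hC2, hm2], ?_⟩
    rw [hgetD, hC2]
    exact head_eq_of_multiset h₂ (w.drop i) hh₂heap (hw.drop) hh₂ne hm2

lemma phase1 (arr : List Int) (k : Int) (idxs : List Int) (hle : (idxs.length : Int) ≤ k) :
    IsHeap (idxs.foldl (fun h i =>
        let h' := heappushA h (PySem.List.pyGetD arr i 0)
        if (h'.length : Int) > k then (heappopA h').2 else h') []) ∧
    (idxs.foldl (fun w i => insortB w (PySem.List.pyGetD arr i 0)) []).Pairwise (· ≤ ·) ∧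
    (idxs.foldl (fun h i =>
        let h' := heappushA h (PySem.List.pyGetD arr i 0)
        if (h'.length : Int) > k then (heappopA h').2 else h') []).length = idxs.length ∧
    (idxs.foldl (fun w i => insortB w (PySem.List.pyGetD arr i 0)) []).length = idxs.length ∧
    (↑(idxs.foldl (fun h i =>
        let h' := heappushA h (PySem.List.pyGetD arr i 0)
        if (h'.length : Int) > k then (heappopA h').2 else h') []) : Multiset Int)
      = (↑(idxs.foldl (fun w i => insortB w (PySem.List.pyGetD arr i 0)) []) : Multiset Int) := by
  induction idxs using List.reverseRecOn with
  | nil => exact ⟨by intro j hj hjl; simp at hjl, by simp, by simp, by simp, by simp⟩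
  | append_singleton idxs i ih =>
      have hle' : (idxs.length : Int) ≤ k := by
        simp only [List.length_append, List.length_singleton] at hle
        push_cast at hle ⊢
        omega
      obtain ⟨ihh, ihs, ihl1, ihl2, ihm⟩ := ih hle'
      simp only [List.foldl_append, List.foldl_cons, List.foldl_nil]
      set hA := idxs.foldl (fun h i =>
        let h' := heappushA h (PySem.List.pyGetD arr i 0)
        if (h'.length : Int) > k then (heappopA h').2 else h') [] with hhA
      set wB := idxs.foldl (fun w i => insortB w (PySem.List.pyGetD arr i 0)) [] with hwB
      set x := PySem.List.pyGetD arr i 0 with hx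
      have hbranch : ¬ (((heappushA hA x).length : Int) > k) := by
        rw [heappushA_length, ihl1]
        simp only [List.length_append, List.length_singleton] at hle
        push_cast at hle ⊢
        omega
      simp only [hbranch, if_false]
      refine ⟨heappushA_heap hA x ihh, insortB_sorted wB x ihs, ?_, ?_, ?_⟩
      · rw [heappushA_length, ihl1]; simp
      · rw [insortB_length, ihl2]; simp
      · rw [heappushA_multiset, insortB_multiset, ihm]

lemma phase2 (arr : List Int) (kn : Nat) (hk : 1 ≤ kn) (k : Int) (hkk : k = (kn : Int)) :
    ∀ (idxs : List Int) (h w res : List Int),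
    IsHeap h → w.Pairwise (· ≤ ·) → h.length = kn → kn ≤ w.length →
    (↑h : Multiset Int) = (↑(w.drop (w.length - kn)) : Multiset Int) →
    (idxs.foldl (fun (st : List Int × List Int) idx =>
        let h' := heappushA st.1 (PySem.List.pyGetD arr idx 0)
        let h'' := if (h'.length : Int) > k then (heappopA h').2 else h'
        (h'', st.2 ++ [PySem.List.pyGetD h'' 0 0])) (h, res)).2
    = (idxs.foldl (fun (st : List Int × List Int) idx =>
        let w' := insortB st.1 (PySem.List.pyGetD arr idx 0)
        (w', st.2 ++ [PySem.List.pyGetD w' ((w'.length : Int) - k) 0])) (w, res)).2 := by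
  intro idxs
  induction idxs with
  | nil => intro h w res _ _ _ _ _; rfl
  | cons idx idxs ih =>
      intro h w res hh hw hlen hwk hm
      simp only [List.foldl_cons]
      set x := PySem.List.pyGetD arr idx 0 with hx
      have hbranch : ((heappushA h x).length : Int) > k := by
        rw [heappushA_length, hlen, hkk]
        push_cast
        omega
      simp only [hbranch, if_true]
      obtain ⟨sheap, slen, smult, shead⟩ := step_lemma kn hk h w x hh hw hlen hwk hm
      set h₂ := (heappopA (heappushA h x)).2 with hh₂
      set w' := insortB w x with hw'
      have hw'len : w'.length = w.length + 1 := insortB_length w x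
      have hvals : PySem.List.pyGetD h₂ 0 0 = PySem.List.pyGetD w' ((w'.length : Int) - k) 0 := by
        rw [PySem.List.pyGetD_zero, hkk,
            show (w'.length : Int) - (kn : Int) = ((w'.length - kn : Nat) : Int) by omega,
            PySem.List.pyGetD_natCast]
        exact shead
      rw [hvals]
      exact ih h₂ w' (res ++ [PySem.List.pyGetD w' ((w'.length : Int) - k) 0]) sheap
        (insortB_sorted w x hw) slen (by omega) smult

-- ===== VERDICT (by name: the statement is the Claim_ definition above) =====
theorem getGreatestElements_spec : Claim_equal_getGreatestElements := by
  intro arr k _ hpre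
  obtain ⟨hk1, hk2⟩ := hpre
  show getGreatestElements arr k = getGreatestElements_alt arr k
  simp only [getGreatestElements, getGreatestElements_alt]
  set kn := k.toNat with hkn
  have hkk : k = (kn : Int) := by omega
  have hrlen : (PySem.List.pyRange 0 k 1).length = kn := by
    rw [PySem.List.length_pyRange_one]; omega
  obtain ⟨hh, hs, hl1, hl2, hm⟩ := phase1 arr k (PySem.List.pyRange 0 k 1) (by rw [hrlen]; omega)
  set hA := (PySem.List.pyRange 0 k 1).foldl
    (fun h i =>
      let h' := heappushA h (PySem.List.pyGetD arr i 0)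
      if (h'.length : Int) > k then (heappopA h').2 else h') [] with hhA
  set wB := (PySem.List.pyRange 0 k 1).foldl
    (fun w i => insortB w (PySem.List.pyGetD arr i 0)) [] with hwB
  rw [hrlen] at hl1 hl2
  have hkn1 : 1 ≤ kn := by omega
  have hAne : hA ≠ [] := by
    intro e; rw [e] at hl1; simp at hl1; omega
  have hres0 : PySem.List.pyGetD hA 0 0 = PySem.List.pyGetD wB 0 0 := by
    rw [PySem.List.pyGetD_zero, PySem.List.pyGetD_zero]
    exact head_eq_of_multiset hA wB hh hs hAne hm
  rw [hres0]
  apply phase2 arr kn hkn1 k hkk (PySem.List.pyRange k (arr.length : Int) 1) hA wB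
    [PySem.List.pyGetD wB 0 0] hh hs hl1 (by omega)
  rw [hl2, Nat.sub_self, List.drop_zero]
  exact hm
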